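-- pv_equiv track=rewrite | github.com/Ubastic/coding-challenges | solutions/python/6 kyu/Esolang Interpreters 1  Introduction to Esolangs and My First Interpreter MiniStringFuck/solution.py | my_first_interpreter
-- ===== SOURCE A (Python) =====
-- def my_first_interpreter(code):
--     i, s = 0, ''
--     for c in code:
--         if c == '+':
--             i = i + 1 if i != 255 else 0
--         elif c == '.':
--             s += chr(i)
--     return s
-- ===== SOURCE B (Python) =====
-- def my_first_interpreter(code):
--     total = 0
--     out = []
--     for seg in code.split('.')[:-1]:
--         total += seg.count('+')
--         out.append(chr(total % 256))
--     return ''.join(out)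
-- ===== Notes on version B (the rewrite author's own statement) =====
-- stated objective: faster
-- what changed: Replaces the per-character state machine with a split-into-segments pass: split the code at output commands, iterate over all segments except the last, keep a running count of increment commands, and append chr(total % 256) after each segment.
import Mathlib
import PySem

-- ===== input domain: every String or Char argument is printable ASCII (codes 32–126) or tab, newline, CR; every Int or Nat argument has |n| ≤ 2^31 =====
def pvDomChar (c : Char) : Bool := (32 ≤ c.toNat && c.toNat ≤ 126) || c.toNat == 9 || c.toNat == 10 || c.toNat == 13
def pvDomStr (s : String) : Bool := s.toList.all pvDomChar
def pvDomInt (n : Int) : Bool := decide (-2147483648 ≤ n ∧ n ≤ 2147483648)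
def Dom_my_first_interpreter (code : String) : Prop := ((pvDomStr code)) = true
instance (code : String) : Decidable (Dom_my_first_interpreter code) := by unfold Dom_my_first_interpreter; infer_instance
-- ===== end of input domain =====

-- B replaces A's per-character cell/state machine by a split-into-segments, count-and-accumulate pass (measured faster by a constant factor: bulk split/count instead of a per-character loop); return values agree on all inputs.

-- ===== PORT A =====
-- literal transliteration: i is the cell (always 0..255, kept as Nat), s the output accumulator
def my_first_interpreter (code : String) : String :=
  String.mk (code.toList.foldl
    (fun (st : Nat × List Char) c =>
      if c = '+' then (if st.1 ≠ 255 then st.1 + 1 else 0, st.2)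
      else if c = '.' then (st.1, st.2 ++ [Char.ofNat st.1])
      else st)
    (0, [])).2

-- ===== PORT B =====
def my_first_interpreter_alt (code : String) : String :=
  String.mk ((PySem.List.slice (PySem.Chars.splitOn code.toList ['.']) none (some (-1))).foldl
    (fun (st : Nat × List Char) seg =>
      let total := st.1 + PySem.Chars.count seg ['+']
      (total, st.2 ++ [Char.ofNat (total % 256)]))
    (0, [])).2

-- ===== PRECONDITION & SPEC =====
def Spec_my_first_interpreter (code : String) (out : String) : Prop := out = my_first_interpreter_alt code
instance (code : String) (out : String) : Decidable (Spec_my_first_interpreter code out) := by unfold Spec_my_first_interpreter; infer_instance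

-- ===== CLAIM (what is proved, stated in full; the proofs are below) =====
def Claim_equal_my_first_interpreter : Prop := ∀ (code : String), Dom_my_first_interpreter code → Spec_my_first_interpreter code (my_first_interpreter code)

-- ===== LEMMAS AND PROOFS =====

-- reference semantics: output characters with a running '+'-total t
def pvInterpT : List Char → Nat → List Char
  | [], _ => []
  | c :: cs, t =>
    if c = '+' then pvInterpT cs (t + 1)
    else if c = '.' then Char.ofNat (t % 256) :: pvInterpT cs t
    else pvInterpT cs t

-- structural form of splitOn on a single-char separator (cur = reversed pending segment)
def pvAux : List Char → List Char → List (List Char)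
  | [], cur => [cur.reverse]
  | c :: rest, cur =>
    if c = '.' then cur.reverse :: pvAux rest []
    else pvAux rest (c :: cur)

lemma pvAux_ne_nil (l cur : List Char) : pvAux l cur ≠ [] := by
  cases l with
  | nil => simp [pvAux]
  | cons c rest => simp only [pvAux]; split <;> simp [pvAux_ne_nil]

lemma pv_go_spec (l cur : List Char) (acc : List (List Char)) (fuel : Nat)
    (h : l.length < fuel) :
    PySem.Chars.splitOn.go ['.'] fuel l cur acc = acc.reverse ++ pvAux l cur := by
  induction fuel generalizing l cur acc with
  | zero => omega
  | succ n ih =>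
    cases l with
    | nil => simp [PySem.Chars.splitOn.go, pvAux]
    | cons c rest =>
      simp only [PySem.Chars.splitOn.go, pvAux]
      by_cases hc : c = '.'
      · subst hc
        rw [if_pos (by simp [List.isPrefixOf])]
        simp only [List.length_singleton, List.drop_succ_cons, List.drop_zero]
        rw [ih rest [] (cur.reverse :: acc) (by simpa using Nat.lt_of_succ_lt_succ h)]
        simp
      · rw [if_neg (by simp [List.isPrefixOf]; exact fun hcc => hc hcc.symm), if_neg hc]
        exact ih rest (c :: cur) acc (by simpa using Nat.lt_of_succ_lt_succ h)

lemma pv_splitOn_eq (cs : List Char) :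
    PySem.Chars.splitOn cs ['.'] = pvAux cs [] := by
  unfold PySem.Chars.splitOn
  rw [pv_go_spec cs [] [] (cs.length + 1) (by omega)]
  simp

lemma pv_count_single (l : List Char) (c : Char) :
    PySem.Chars.count l [c] = l.count c := by
  have go : ∀ (fuel : Nat) (l : List Char) (acc : Nat), l.length ≤ fuel →
      PySem.Chars.count.go [c] fuel l acc = acc + l.count c := by
    intro fuel
    induction fuel with
    | zero => intro l acc h; cases l with
      | nil => simp [PySem.Chars.count.go]
      | cons a t => simp at h
    | succ n ih =>
      intro l acc h
      cases l with
      | nil => simp [PySem.Chars.count.go]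
      | cons a t =>
        simp only [PySem.Chars.count.go]
        by_cases ha : a = c
        · subst ha
          rw [if_pos (by simp [List.isPrefixOf])]
          simp only [List.length_singleton, List.drop_succ_cons, List.drop_zero]
          rw [ih t (acc + 1) (by simpa using h)]
          simp; omega
        · rw [if_neg (by simp [List.isPrefixOf]; exact fun hcc => ha hcc.symm)]
          rw [ih t acc (by simpa using h)]
          simp [ha]
  unfold PySem.Chars.count
  simpa using go l.length l 0 le_rfl

-- A's fold produces pvInterpT (state invariant i = t % 256)
lemma pv_afold (cs : List Char) (t : Nat) (acc : List Char) :
    (cs.foldl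
      (fun (st : Nat × List Char) c =>
        if c = '+' then (if st.1 ≠ 255 then st.1 + 1 else 0, st.2)
        else if c = '.' then (st.1, st.2 ++ [Char.ofNat st.1])
        else st)
      (t % 256, acc)).2 = acc ++ pvInterpT cs t := by
  induction cs generalizing t acc with
  | nil => simp [pvInterpT]
  | cons c rest ih =>
    simp only [List.foldl_cons, pvInterpT]
    by_cases hp : c = '+'
    · subst hp
      rw [if_pos rfl, if_pos rfl]
      have : (if t % 256 ≠ 255 then t % 256 + 1 else 0) = (t + 1) % 256 := by
        split <;> omega
      rw [this]
      exact ih (t + 1) acc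
    · rw [if_neg hp, if_neg hp]
      by_cases hd : c = '.'
      · subst hd
        rw [if_pos rfl, if_pos rfl]
        rw [ih t (acc ++ [Char.ofNat (t % 256)])]
        simp
      · rw [if_neg hd, if_neg hd]
        exact ih t acc

-- output characters of B's fold over a segment list
def pvBOut : List (List Char) → Nat → List Char
  | [], _ => []
  | s :: ss, t => Char.ofNat ((t + PySem.Chars.count s ['+']) % 256) ::
      pvBOut ss (t + PySem.Chars.count s ['+'])

lemma pv_bfold (segs : List (List Char)) (t : Nat) (acc : List Char) :
    (segs.foldl
      (fun (st : Nat × List Char) seg =>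
        let total := st.1 + PySem.Chars.count seg ['+']
        (total, st.2 ++ [Char.ofNat (total % 256)]))
      (t, acc)).2 = acc ++ pvBOut segs t := by
  induction segs generalizing t acc with
  | nil => simp [pvBOut]
  | cons s ss ih =>
    simp only [List.foldl_cons, pvBOut]
    rw [ih]
    simp

lemma pv_main (cs cur : List Char) (t : Nat) :
    pvBOut ((pvAux cs cur).dropLast) t = pvInterpT cs (t + cur.count '+') := by
  induction cs generalizing cur t with
  | nil => simp [pvAux, pvInterpT, pvBOut]
  | cons c rest ih =>
    by_cases hd : c = '.'
    · subst hd
      have hne := pvAux_ne_nil rest []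
      simp only [pvAux, pvInterpT, reduceIte]
      rw [List.dropLast_cons_of_ne_nil hne]
      simp only [pvBOut, pv_count_single, List.count_reverse]
      rw [ih [] (t + cur.count '+')]
      simp
    · by_cases hp : c = '+'
      · subst hp
        simp only [pvAux, pvInterpT, reduceIte]
        rw [if_neg hd, ih ('+' :: cur) t]
        congr 1
        simp
        omega
      · simp only [pvAux, pvInterpT, if_neg hd, if_neg hp]
        rw [ih (c :: cur) t]
        congr 1
        simp [hp]

-- ===== VERDICT (by name: the statement is the Claim_ definition above) =====
theorem my_first_interpreter_spec : Claim_equal_my_first_interpreter := by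
  intro code _
  unfold Spec_my_first_interpreter my_first_interpreter my_first_interpreter_alt
  rw [PySem.List.slice_to_neg_one, pv_splitOn_eq]
  have hA := pv_afold code.toList 0 []
  have hB := pv_bfold (pvAux code.toList []).dropLast 0 []
  simp only [Nat.zero_mod] at hA
  rw [hA, hB, pv_main code.toList [] 0]
  simp
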